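-- pv_equiv track=rewrite | github.com/ElectroWave182/Diviser_pour_regner_TP_2 | exercice 3.py | maxi_colonne_centrale
-- ===== SOURCE A (Python) =====
-- def maxi_colonne_centrale (mat, colonne):
--
--     maxi = mat[0][colonne]
--     indice = 0
--     for ligne in range (len (mat)):
--
--         val = mat[ligne][colonne]
--         if val > maxi:
--             maxi = val
--             indice = ligne
--
--     return maxi, indice
-- ===== SOURCE B (Python) =====
-- def maxi_colonne_centrale(mat, colonne):
--
--     def helper(lo, hi):
--         if lo == hi:
--             return mat[lo][colonne], lo
--         mid = (lo + hi) // 2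
--         gauche = helper(lo, mid)
--         droite = helper(mid + 1, hi)
--         return gauche if gauche[0] >= droite[0] else droite
--
--     return helper(0, len(mat) - 1)
-- ===== Notes on version B (the rewrite author's own statement) =====
-- stated objective: alternative
-- what changed: Replaced the flat left-to-right scan with a balanced divide-and-conquer recursion over the row-index range, combining halves with a tie-toward-lower-index rule.
import Mathlib
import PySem

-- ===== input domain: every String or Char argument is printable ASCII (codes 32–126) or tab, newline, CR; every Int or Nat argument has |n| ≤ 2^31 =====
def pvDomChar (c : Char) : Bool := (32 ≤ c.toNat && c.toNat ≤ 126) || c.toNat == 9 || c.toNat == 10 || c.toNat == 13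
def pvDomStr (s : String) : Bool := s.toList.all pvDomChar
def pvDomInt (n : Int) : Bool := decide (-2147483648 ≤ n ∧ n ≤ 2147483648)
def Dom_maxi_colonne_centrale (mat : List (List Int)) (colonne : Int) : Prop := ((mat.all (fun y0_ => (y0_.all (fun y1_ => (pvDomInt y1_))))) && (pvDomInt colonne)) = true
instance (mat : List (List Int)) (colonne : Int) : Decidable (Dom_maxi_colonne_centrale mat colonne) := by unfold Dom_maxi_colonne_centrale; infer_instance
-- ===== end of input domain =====

-- B replaces A's flat scan with a balanced divide-and-conquer over the row range (same O(n) cost,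
-- different decomposition); equality is about the return value, neither program mutates its input.

-- mat[ligne][colonne]; the defaults are never reached under Pre_ (both indices in range there)
def pvCell (mat : List (List Int)) (colonne : Int) (i : Int) : Int :=
  PySem.List.pyGetD (PySem.List.pyGetD mat i []) colonne 0

-- ===== PORT A =====
def maxi_colonne_centrale (mat : List (List Int)) (colonne : Int) : Int × Int :=
  let maxi := pvCell mat colonne 0
  (PySem.List.pyRange 0 (mat.length : Int) 1).foldl
    (fun st ligne =>
      let val := pvCell mat colonne ligne
      if st.1 < val then (val, ligne) else st)
    (maxi, 0)

-- ===== PORT B =====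
-- helper(lo, hi) of Source B; on its call sites 0 ≤ lo ≤ hi, so Nat bounds are faithful
def pvAltGo (mat : List (List Int)) (colonne : Int) (lo hi : Nat) : Int × Int :=
  if _h : lo < hi then
    let mid := (lo + hi) / 2
    let gauche := pvAltGo mat colonne lo mid
    let droite := pvAltGo mat colonne (mid + 1) hi
    if droite.1 ≤ gauche.1 then gauche else droite
  else (pvCell mat colonne (lo : Int), (lo : Int))
termination_by hi - lo
decreasing_by all_goals omega

def maxi_colonne_centrale_alt (mat : List (List Int)) (colonne : Int) : Int × Int :=
  -- totality guard: on an empty matrix Source B's helper does not return (and A raises; excluded by Pre_)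
  if mat.length = 0 then (0, 0) else pvAltGo mat colonne 0 (mat.length - 1)

-- ===== PRECONDITION & SPEC =====
-- exactly where Python A returns: a nonempty matrix and colonne a valid (possibly negative) index into every row
def Pre_maxi_colonne_centrale (mat : List (List Int)) (colonne : Int) : Prop :=
  mat ≠ [] ∧ ∀ row ∈ mat, PySem.Raise.InRange row.length colonne
instance (mat : List (List Int)) (colonne : Int) : Decidable (Pre_maxi_colonne_centrale mat colonne) := by unfold Pre_maxi_colonne_centrale; infer_instance

def pvWitness_maxi_colonne_centrale : List (List Int) × Int := ([[3, 1], [7, 2], [7, 5]], 0)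

def Spec_maxi_colonne_centrale (mat : List (List Int)) (colonne : Int) (out : Int × Int) : Prop := out = maxi_colonne_centrale_alt mat colonne
instance (mat : List (List Int)) (colonne : Int) (out : Int × Int) : Decidable (Spec_maxi_colonne_centrale mat colonne out) := by unfold Spec_maxi_colonne_centrale; infer_instance

-- ===== CLAIM (what is proved, stated in full; the proofs are below) =====
def Claim_equal_maxi_colonne_centrale : Prop := ∀ (mat : List (List Int)) (colonne : Int), Dom_maxi_colonne_centrale mat colonne → Pre_maxi_colonne_centrale mat colonne → Spec_maxi_colonne_centrale mat colonne (maxi_colonne_centrale mat colonne)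

-- ===== LEMMAS AND PROOFS =====

-- A's loop body as a named step function
def pvStep (mat : List (List Int)) (colonne : Int) (st : Int × Int) (ligne : Int) : Int × Int :=
  let val := pvCell mat colonne ligne
  if st.1 < val then (val, ligne) else st

-- result of A's scan over rows j..k, started at row j
def pvScan (mat : List (List Int)) (colonne : Int) (j k : Int) : Int × Int :=
  (PySem.List.pyRange (j + 1) (k + 1) 1).foldl (pvStep mat colonne) (pvCell mat colonne j, j)

lemma pvM (mat : List (List Int)) (colonne : Int) :
    ∀ (n : Nat) (j k : Int), j ≤ k → (k - j).toNat = n → ∀ acc : Int × Int,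
      (PySem.List.pyRange j (k + 1) 1).foldl (pvStep mat colonne) acc =
        if acc.1 < (pvScan mat colonne j k).1 then pvScan mat colonne j k else acc := by
  intro n
  induction n with
  | zero =>
      intro j k hjk h0 acc
      have hjk' : j = k := by omega
      subst hjk'
      simp [pvScan, PySem.List.pyRange_one_singleton, PySem.List.pyRange_one_eq_nil (le_refl (j+1)),
        pvStep]
  | succ n ih =>
      intro j k hjk hn acc
      have hlt : j < k := by omega
      rw [PySem.List.pyRange_one_cons (by omega : j < k + 1)]
      simp only [List.foldl_cons]
      have ih1 := ih (j + 1) k (by omega) (by omega) (pvStep mat colonne acc j)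
      have ih2 := ih (j + 1) k (by omega) (by omega) (pvCell mat colonne j, j)
      have hscan : pvScan mat colonne j k =
          if (pvCell mat colonne j) < (pvScan mat colonne (j+1) k).1 then pvScan mat colonne (j+1) k
          else (pvCell mat colonne j, j) := by
        rw [pvScan]; rw [ih2]
      rw [ih1, hscan]
      simp only [pvStep, pvCell]
      split_ifs <;> first | rfl | omega

-- splitting A's scan at a middle row
lemma pvSplit (mat : List (List Int)) (colonne : Int) (j m k : Int)
    (h1 : j ≤ m) (h2 : m ≤ k) :
    pvScan mat colonne j k =
      (PySem.List.pyRange (m + 1) (k + 1) 1).foldl (pvStep mat colonne) (pvScan mat colonne j m) := by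
  unfold pvScan
  rw [PySem.List.pyRange_one_append (j + 1) (m + 1) (k + 1) (by omega) (by omega), List.foldl_append]

-- B's recursion computes A's scan over the same row range
lemma pvH (mat : List (List Int)) (colonne : Int) :
    ∀ (n lo hi : Nat), lo ≤ hi → hi - lo = n →
      pvAltGo mat colonne lo hi = pvScan mat colonne (lo : Int) (hi : Int) := by
  intro n
  induction n using Nat.strong_induction_on with
  | _ n ih =>
    intro lo hi hle hn
    rw [pvAltGo]
    split
    · next hlt =>
      have hmid1 : (lo + hi) / 2 - lo < n := by omega
      have hmid2 : hi - ((lo + hi) / 2 + 1) < n := by omega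
      show (if (pvAltGo mat colonne ((lo + hi) / 2 + 1) hi).1 ≤ (pvAltGo mat colonne lo ((lo + hi) / 2)).1
            then pvAltGo mat colonne lo ((lo + hi) / 2)
            else pvAltGo mat colonne ((lo + hi) / 2 + 1) hi) = pvScan mat colonne (lo : Int) (hi : Int)
      rw [ih _ hmid1 lo ((lo + hi) / 2) (by omega) rfl,
          ih _ hmid2 ((lo + hi) / 2 + 1) hi (by omega) rfl]
      have hcast : (((lo + hi) / 2 + 1 : Nat) : Int) = ((lo + hi) / 2 : Nat) + 1 := by push_cast; ring
      rw [hcast]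
      have hsplit := pvSplit mat colonne (lo : Int) (((lo + hi) / 2 : Nat) : Int) (hi : Int)
        (by exact_mod_cast Nat.le_div_iff_mul_le (by omega) |>.mpr (by omega)) (by exact_mod_cast Nat.div_le_of_le_mul (by omega))
      have hM := pvM mat colonne ((hi : Int) - (((lo + hi) / 2 : Nat) + 1)).toNat
        ((((lo + hi) / 2 : Nat) : Int) + 1) (hi : Int) (by exact_mod_cast by omega) rfl
        (pvScan mat colonne (lo : Int) (((lo + hi) / 2 : Nat) : Int))
      rw [hsplit, hM]
      split_ifs <;> first | rfl | omega
    · next hnlt =>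
      have : lo = hi := by omega
      subst this
      simp [pvScan, PySem.List.pyRange_one_eq_nil (le_refl ((lo : Int) + 1))]

-- ===== VERDICT (by name: the statement is the Claim_ definition above) =====
theorem maxi_colonne_centrale_spec : Claim_equal_maxi_colonne_centrale := by
  intro mat colonne _hdom hpre
  obtain ⟨hne, -⟩ := hpre
  have hlen : 1 ≤ mat.length := by
    cases mat with
    | nil => exact absurd rfl hne
    | cons x xs => simp
  unfold Spec_maxi_colonne_centrale maxi_colonne_centrale maxi_colonne_centrale_alt
  rw [if_neg (by omega)]
  rw [pvH mat colonne (mat.length - 1) 0 (mat.length - 1) (by omega) rfl]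
  have hcast : ((mat.length - 1 : Nat) : Int) = (mat.length : Int) - 1 := by
    push_cast [hlen]; ring
  rw [hcast]
  rw [PySem.List.pyRange_one_cons (by exact_mod_cast hlen : (0 : Int) < (mat.length : Int))]
  simp only [List.foldl_cons]
  have hstep0 : (fun (st : Int × Int) (ligne : Int) =>
      let val := pvCell mat colonne ligne
      if st.1 < val then (val, ligne) else st) = pvStep mat colonne := rfl
  rw [hstep0, if_neg (lt_irrefl _)]
  unfold pvScan
  norm_num
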